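-- pv_equiv track=rewrite | github.com/incnone/AdventOfCode | 2017/day9.py | do_cancels
-- ===== SOURCE A (Python) =====
-- def do_cancels(s):
--     skip = False
--     t = ''
--     for c in s:
--         if skip:
--             skip = False
--             continue
--         if c == '!':
--             skip = True
--         else:
--             t += c
--     return t
-- ===== SOURCE B (Python) =====
-- def do_cancels(s):
--     parts = []
--     while True:
--         j = s.find('!')
--         if j == -1:
--             parts.append(s)
--             return ''.join(parts)
--         parts.append(s[:j])
--         s = s[j + 2:]
-- ===== Notes on version B (the rewrite author's own statement) =====
-- stated objective: faster
-- what changed: Replaces the per-character skip-flag state machine (building the result by repeated string concatenation) with block copying: repeatedly locate the next bang with str.find, append the whole slice before it to a parts list, drop two characters, and join the parts at the end.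
import Mathlib
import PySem

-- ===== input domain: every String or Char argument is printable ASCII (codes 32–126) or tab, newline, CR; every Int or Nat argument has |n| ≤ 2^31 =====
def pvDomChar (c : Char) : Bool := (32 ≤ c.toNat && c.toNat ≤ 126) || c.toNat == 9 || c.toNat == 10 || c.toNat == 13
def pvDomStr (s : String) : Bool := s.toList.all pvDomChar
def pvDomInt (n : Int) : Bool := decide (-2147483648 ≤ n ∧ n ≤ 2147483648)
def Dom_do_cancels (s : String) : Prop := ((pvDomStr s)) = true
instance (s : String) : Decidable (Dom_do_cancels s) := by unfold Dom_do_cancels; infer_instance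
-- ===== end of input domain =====

-- B replaces A's per-character skip-flag loop by block copying: it repeatedly finds the
-- next '!' with str.find, appends the whole slice before it, and skips two characters;
-- return values proved equal on Dom.

-- ===== PORT A =====
-- A: for c in s with a skip flag; ported as a foldl over s.toList with state (skip, t)
def stepA (st : Bool × String) (c : Char) : Bool × String :=
  if st.1 then (false, st.2)
  else if c = '!' then (true, st.2)
  else (false, st.2.push c)

def do_cancels (s : String) : String :=
  (s.toList.foldl stepA (false, "")).2

-- ===== PORT B =====
-- B: parts = []; loop: j = s.find('!'); if j == -1: parts.append(s); return ''.join(parts)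
--    else: parts.append(s[:j]); s = s[j+2:]
-- The loop becomes recursion on the remaining string; the slices s[:j] and s[j+2:] have
-- nonnegative bounds (j ≥ 0 here), where Python slicing is exactly List.take / List.drop.
def goB (l : List Char) (parts : List String) : String :=
  let j := PySem.Chars.find l ['!']
  if h : j = -1 then PySem.Str.join "" (parts ++ [String.ofList l])
  else goB (l.drop (j.toNat + 2)) (parts ++ [String.ofList (l.take j.toNat)])
termination_by l.length
decreasing_by
  have hinf : ['!'] <:+: l := (PySem.Chars.find_ne_neg_one_iff l ['!']).mp h
  have hl : 0 < l.length := by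
    rcases hinf with ⟨p, q, hpq⟩
    simp [← hpq]
  simp only [List.length_drop]
  omega

def do_cancels_alt (s : String) : String := goB s.toList []

-- ===== PRECONDITION & SPEC =====
def Spec_do_cancels (s : String) (out : String) : Prop := out = do_cancels_alt s
instance (s : String) (out : String) : Decidable (Spec_do_cancels s out) := by unfold Spec_do_cancels; infer_instance

-- ===== CLAIM (what is proved, stated in full; the proofs are below) =====
def Claim_equal_do_cancels : Prop := ∀ (s : String), Dom_do_cancels s → Spec_do_cancels s (do_cancels s)

-- ===== LEMMAS AND PROOFS =====

-- the common value of both programs, as a pure list function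
def eraseBang : List Char → List Char
  | [] => []
  | c :: r => if c = '!' then eraseBang (r.drop 1) else c :: eraseBang r
termination_by l => l.length
decreasing_by
  · simp only [List.length_drop, List.length_cons]; omega
  · simp

theorem eraseBang_of_not_mem : ∀ (l : List Char), '!' ∉ l → eraseBang l = l := by
  intro l
  induction l with
  | nil => intro _; simp [eraseBang]
  | cons c r ih =>
    intro h
    have hc : c ≠ '!' := by intro hc; exact h (by simp [hc])
    simp only [eraseBang, if_neg hc]
    rw [ih (by intro hm; exact h (by simp [hm]))]

theorem eraseBang_clean_append : ∀ (p m : List Char), '!' ∉ p → eraseBang (p ++ m) = p ++ eraseBang m := by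
  intro p
  induction p with
  | nil => intro m _; simp
  | cons c r ih =>
    intro m h
    have hc : c ≠ '!' := by intro hc; exact h (by simp [hc])
    simp only [List.cons_append, eraseBang, if_neg hc]
    rw [ih m (by intro hm; exact h (by simp [hm]))]

theorem eraseBang_bang (r : List Char) : eraseBang ('!' :: r) = eraseBang (r.drop 1) := by
  simp [eraseBang]

-- A's fold computes t ++ eraseBang
theorem foldlA_eq : ∀ (l : List Char) (t : String),
    (List.foldl stepA (false, t) l).2 = t ++ String.ofList (eraseBang l) := by
  intro l
  induction l using eraseBang.induct with
  | case1 => intro t; simp [eraseBang]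
  | case2 r ih =>
    intro t
    cases r with
    | nil => simp [stepA, eraseBang]
    | cons d r' =>
      have h2 : (List.foldl stepA (false, t) ('!' :: d :: r')).2
           = (List.foldl stepA (false, t) r').2 := by
        simp [stepA]
      rw [h2]
      simpa [eraseBang] using ih t
  | case3 c r hc ih =>
    intro t
    have h2 : (List.foldl stepA (false, t) (c :: r)).2
         = (List.foldl stepA (false, t.push c) r).2 := by
      simp [stepA, if_neg hc]
    rw [h2, ih (t.push c)]
    apply String.ext
    simp [eraseBang, if_neg hc]

theorem join_empty_append (parts : List String) (x : String) :
    PySem.Str.join "" (parts ++ [x]) = PySem.Str.join "" parts ++ x := by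
  apply String.ext
  simp only [String.toList_append, PySem.Str.toList_join, PySem.Chars.join, String.toList_empty,
    List.map_append, List.map_cons, List.map_nil, List.intercalate]
  induction (List.map String.toList parts) with
  | nil => simp
  | cons a ls ih =>
    cases ls with
    | nil => simp
    | cons b ls => simpa using ih

-- B's loop computes join parts ++ eraseBang
theorem goB_eq : ∀ (l : List Char) (parts : List String),
    goB l parts = PySem.Str.join "" parts ++ String.ofList (eraseBang l) := by
  intro l parts
  induction l, parts using goB.induct with
  | case1 l parts j hj =>
    have hj' : PySem.Chars.find l ['!'] = -1 := hj
    rw [goB]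
    simp only [dif_pos hj', join_empty_append]
    have hnotin : '!' ∉ l := by
      intro hm
      have hinf : ['!'] <:+: l := by
        obtain ⟨p, q, rfl⟩ := List.append_of_mem hm
        exact ⟨p, q, by simp⟩
      exact ((PySem.Chars.find_eq_neg_one_iff l ['!']).mp hj') hinf
    rw [eraseBang_of_not_mem l hnotin]
  | case2 l parts j hj ih =>
    have hj' : PySem.Chars.find l ['!'] ≠ -1 := hj
    have ih' : goB (List.drop ((PySem.Chars.find l ['!']).toNat + 2) l)
        (parts ++ [String.ofList (List.take (PySem.Chars.find l ['!']).toNat l)])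
        = PySem.Str.join "" (parts ++ [String.ofList (List.take (PySem.Chars.find l ['!']).toNat l)])
          ++ String.ofList (eraseBang (List.drop ((PySem.Chars.find l ['!']).toNat + 2) l)) := ih
    rw [goB]
    simp only [dif_neg hj']
    rw [ih', join_empty_append]
    -- decompose l at the first '!'
    have hnn : 0 ≤ PySem.Chars.find l ['!'] := by
      have := PySem.Chars.neg_one_le_find l ['!']
      omega
    obtain ⟨hpre, hmin⟩ := PySem.Chars.find_spec hnn
    set n := (PySem.Chars.find l ['!']).toNat with hn
    have hlt : n < l.length := by
      by_contra hge
      rw [List.drop_eq_nil_of_le (by omega)] at hpre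
      simp at hpre
    have hdropn : l.drop n = '!' :: l.drop (n + 1) := by
      rcases hpre with ⟨t, ht⟩
      rw [List.drop_eq_getElem_cons hlt] at ht
      rw [List.drop_eq_getElem_cons hlt]
      injection ht with h1 _
      rw [← h1]
    have htake : '!' ∉ l.take n := by
      intro hm
      obtain ⟨i, hi, hgi⟩ := List.getElem_of_mem hm
      have hi' : i < n := by simp at hi; omega
      apply hmin i hi'
      rw [List.drop_eq_getElem_cons (by omega)]
      have hgi' : l[i] = '!' := by
        rw [← hgi]; simp [List.getElem_take]
      simp [hgi']
    have hsplit : l = l.take n ++ '!' :: l.drop (n + 1) := by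
      rw [← hdropn, List.take_append_drop]
    have herase : eraseBang l = l.take n ++ eraseBang (l.drop (n + 2)) := by
      conv_lhs => rw [hsplit]
      rw [eraseBang_clean_append _ _ htake, eraseBang_bang]
      rw [List.drop_drop]
    rw [herase]
    apply String.ext
    simp

-- ===== VERDICT (by name: the statement is the Claim_ definition above) =====
theorem do_cancels_spec : Claim_equal_do_cancels := by
  intro s _
  unfold Spec_do_cancels do_cancels do_cancels_alt
  rw [foldlA_eq, goB_eq]
  apply String.ext
  simp [PySem.Str.toList_join, PySem.Chars.join, List.intercalate]
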